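-- pv_equiv track=rewrite | github.com/syed-ameer-john-sk/Client7 | classes.py | _sort_workflow_steps
-- ===== SOURCE A (Python) =====
-- def _sort_workflow_steps(steps):
-- 	sorted_steps = [None, None, None]
-- 	for step in steps:
-- 		if step == "PRE":
-- 			sorted_steps[0] = step
-- 		elif step == "RUN":
-- 			sorted_steps[1] = step
-- 		else:
-- 			sorted_steps[2] = step
-- 	return [step for step in sorted_steps if step != None]
-- ===== SOURCE B (Python) =====
-- def _sort_workflow_steps(steps):
--     steps = list(steps)
--     result = []
--     if "PRE" in steps:
--         result.append("PRE")
--     if "RUN" in steps: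
--         result.append("RUN")
--     others = [s for s in steps if s != "PRE" and s != "RUN"]
--     if others:
--         result.append(others[-1])
--     return result
-- ===== Notes on version B (the rewrite author's own statement) =====
-- stated objective: idiomatic
-- what changed: Replaced the three-slot sentinel array mutated in one bucketing loop by direct membership tests for PRE/RUN plus a filter taking the last non-PRE/RUN element.
import Mathlib
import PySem

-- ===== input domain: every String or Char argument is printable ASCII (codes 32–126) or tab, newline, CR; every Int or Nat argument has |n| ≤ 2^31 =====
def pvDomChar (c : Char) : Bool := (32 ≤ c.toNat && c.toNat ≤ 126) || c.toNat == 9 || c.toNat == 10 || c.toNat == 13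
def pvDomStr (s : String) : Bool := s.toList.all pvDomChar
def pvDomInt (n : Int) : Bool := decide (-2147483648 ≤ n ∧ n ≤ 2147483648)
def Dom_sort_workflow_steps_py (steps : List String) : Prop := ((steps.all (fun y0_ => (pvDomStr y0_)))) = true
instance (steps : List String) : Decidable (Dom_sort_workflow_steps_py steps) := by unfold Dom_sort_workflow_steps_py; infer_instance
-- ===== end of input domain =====

-- B replaces A's three-slot sentinel array mutated in a bucketing loop with direct
-- membership tests for "PRE"/"RUN" plus a filter taking the last other element (idiomatic).


-- ===== PORT A =====
-- the loop body: update one of the three slots depending on the step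
def pvAStep (s : Option String × Option String × Option String) (step : String) :
    Option String × Option String × Option String :=
  if step == "PRE" then (some step, s.2.1, s.2.2)
  else if step == "RUN" then (s.1, some step, s.2.2)
  else (s.1, s.2.1, some step)

def sort_workflow_steps_py (steps : List String) : List String :=
  let t := steps.foldl pvAStep (none, none, none)
  -- [step for step in sorted_steps if step != None]
  ([t.1, t.2.1, t.2.2].filterMap id)

-- ===== PORT B =====
def sort_workflow_steps_py_alt (steps : List String) : List String :=
  let result₀ : List String := if steps.contains "PRE" then ["PRE"] else []
  let result₁ : List String := if steps.contains "RUN" then result₀ ++ ["RUN"] else result₀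
  let others : List String := steps.filter (fun s => !(s == "PRE") && !(s == "RUN"))
  match others.getLast? with
  | some x => result₁ ++ [x]
  | none => result₁

-- ===== PRECONDITION & SPEC =====
def Spec_sort_workflow_steps_py (steps : List String) (out : List String) : Prop := out = sort_workflow_steps_py_alt steps
instance (steps : List String) (out : List String) : Decidable (Spec_sort_workflow_steps_py steps out) := by unfold Spec_sort_workflow_steps_py; infer_instance

-- ===== CLAIM (what is proved, stated in full; the proofs are below) =====
def Claim_equal_sort_workflow_steps_py : Prop := ∀ (steps : List String), Dom_sort_workflow_steps_py steps → Spec_sort_workflow_steps_py steps (sort_workflow_steps_py steps)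

-- ===== LEMMAS AND PROOFS =====

-- characterization of A's fold state for an arbitrary initial accumulator
theorem pvFold_char (steps : List String) (a b c : Option String) :
    steps.foldl pvAStep (a, b, c) =
      ((if steps.contains "PRE" then some "PRE" else a),
       (if steps.contains "RUN" then some "RUN" else b),
       ((steps.filter (fun s => !(s == "PRE") && !(s == "RUN"))).getLast?).or c) := by
  induction steps generalizing a b c with
  | nil => simp
  | cons x xs ih =>
    by_cases hp : x = "PRE"
    · subst hp
      simp [pvAStep, ih]
    · by_cases hr : x = "RUN"
      · subst hr
        simp [pvAStep, ih]
      · have hfc : (x :: xs).filter (fun s => !(s == "PRE") && !(s == "RUN")) =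
            x :: xs.filter (fun s => !(s == "PRE") && !(s == "RUN")) := by
          simp [hp, hr]
        simp only [List.foldl_cons, pvAStep, beq_iff_eq, hp, hr, if_false, ih, hfc]
        simp [List.getLast?_cons, Ne.symm hp, Ne.symm hr]

theorem sort_eq (steps : List String) :
    sort_workflow_steps_py steps = sort_workflow_steps_py_alt steps := by
  unfold sort_workflow_steps_py sort_workflow_steps_py_alt
  rw [pvFold_char]
  cases hP : steps.contains "PRE" <;> cases hR : steps.contains "RUN" <;>
    cases hL : (steps.filter (fun s => !(s == "PRE") && !(s == "RUN"))).getLast? <;>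
      simp [hL, List.filterMap]

-- ===== VERDICT (by name: the statement is the Claim_ definition above) =====
theorem sort_workflow_steps_py_spec : Claim_equal_sort_workflow_steps_py := by
  intro steps _
  exact sort_eq steps
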